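-- pv_equiv track=rewrite | github.com/JohanFernando96/KPI_Research_App | backend/modules/employee_matching/skill_matcher.py | _are_skill_variations
-- ===== SOURCE A (Python) =====
-- def _are_skill_variations(skill1, skill2):
--     """Check if two skills are known variations of each other."""
--     variations = [
--         {'javascript', 'js', 'ecmascript'},
--         {'typescript', 'ts'},
--         {'python', 'py'},
--         {'c++', 'cpp', 'cplusplus'},
--         {'c#', 'csharp', 'c sharp'},
--         {'nodejs', 'node', 'node.js'},
--         {'react', 'reactjs', 'react.js'},
--         {'angular', 'angularjs', 'angular.js'},
--         {'vue', 'vuejs', 'vue.js'},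
--         {'mongodb', 'mongo'},
--         {'postgresql', 'postgres'},
--         {'docker', 'containers', 'containerization'},
--         {'kubernetes', 'k8s'},
--         {'aws', 'amazon web services'},
--         {'gcp', 'google cloud platform', 'google cloud'},
--         {'azure', 'microsoft azure'},
--     ]
--
--     for variation_set in variations:
--         if skill1 in variation_set and skill2 in variation_set:
--             return True
--
--     return False
-- ===== SOURCE B (Python) =====
-- # All variation groups in one compact spec string: groups separated by '|',
-- # variants within a group by ','.
-- _GROUPS_SPEC = (
--     "javascript,js,ecmascript|typescript,ts|python,py|c++,cpp,cplusplus|"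
--     "c#,csharp,c sharp|nodejs,node,node.js|react,reactjs,react.js|"
--     "angular,angularjs,angular.js|vue,vuejs,vue.js|mongodb,mongo|"
--     "postgresql,postgres|docker,containers,containerization|kubernetes,k8s|"
--     "aws,amazon web services|gcp,google cloud platform,google cloud|"
--     "azure,microsoft azure"
-- )
--
-- # Flat index built once: every variant string -> its group number.
-- _GROUP_INDEX = {
--     skill: i
--     for i, group in enumerate(_GROUPS_SPEC.split('|'))
--     for skill in group.split(',')
-- }
--
--
-- def _are_skill_variations(skill1, skill2):
--     """Check if two skills are known variations of each other."""
--     g1 = _GROUP_INDEX.get(skill1)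
--     return g1 is not None and g1 == _GROUP_INDEX.get(skill2)
-- ===== Notes on version B (the rewrite author's own statement) =====
-- stated objective: idiomatic
-- what changed: Replaces the per-call scan over 16 variation sets by a flat variant->group-index dict built once by parsing a compact spec string; the function is then two dict lookups and an equality test.
import Mathlib
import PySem

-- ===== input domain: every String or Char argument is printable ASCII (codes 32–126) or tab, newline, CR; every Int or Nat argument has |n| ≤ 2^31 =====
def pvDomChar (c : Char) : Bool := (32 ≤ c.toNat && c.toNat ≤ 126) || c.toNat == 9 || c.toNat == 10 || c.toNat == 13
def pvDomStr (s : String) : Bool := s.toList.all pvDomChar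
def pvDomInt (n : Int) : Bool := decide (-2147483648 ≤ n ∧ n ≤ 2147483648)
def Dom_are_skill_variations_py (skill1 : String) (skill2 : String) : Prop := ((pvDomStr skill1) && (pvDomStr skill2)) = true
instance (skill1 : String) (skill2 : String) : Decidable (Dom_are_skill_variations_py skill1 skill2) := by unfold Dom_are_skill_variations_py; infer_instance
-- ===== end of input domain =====

set_option maxRecDepth 100000
set_option maxHeartbeats 2000000


-- B parses one compact spec string ("group|group|..." with ","-separated variants)
-- once into a flat variant -> group-index dict; the function is two lookups and an
-- equality test (same return value as A's per-call scan over the 16 variation sets).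

-- ===== PORT A =====
def pvVariations : List (PySem.Set String) :=
  [PySem.Set.ofList ["javascript", "js", "ecmascript"],
   PySem.Set.ofList ["typescript", "ts"],
   PySem.Set.ofList ["python", "py"],
   PySem.Set.ofList ["c++", "cpp", "cplusplus"],
   PySem.Set.ofList ["c#", "csharp", "c sharp"],
   PySem.Set.ofList ["nodejs", "node", "node.js"],
   PySem.Set.ofList ["react", "reactjs", "react.js"],
   PySem.Set.ofList ["angular", "angularjs", "angular.js"],
   PySem.Set.ofList ["vue", "vuejs", "vue.js"],
   PySem.Set.ofList ["mongodb", "mongo"],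
   PySem.Set.ofList ["postgresql", "postgres"],
   PySem.Set.ofList ["docker", "containers", "containerization"],
   PySem.Set.ofList ["kubernetes", "k8s"],
   PySem.Set.ofList ["aws", "amazon web services"],
   PySem.Set.ofList ["gcp", "google cloud platform", "google cloud"],
   PySem.Set.ofList ["azure", "microsoft azure"]]

def pvLoopA (skill1 skill2 : String) : List (PySem.Set String) → Bool
  | [] => false
  | g :: rest =>
      if PySem.Set.contains g skill1 && PySem.Set.contains g skill2 then true
      else pvLoopA skill1 skill2 rest

def are_skill_variations_py (skill1 : String) (skill2 : String) : Bool :=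
  pvLoopA skill1 skill2 pvVariations

-- ===== PORT B =====
def pvGroupsSpec : String :=
  "javascript,js,ecmascript|typescript,ts|python,py|c++,cpp,cplusplus|c#,csharp,c sharp|nodejs,node,node.js|react,reactjs,react.js|angular,angularjs,angular.js|vue,vuejs,vue.js|mongodb,mongo|postgresql,postgres|docker,containers,containerization|kubernetes,k8s|aws,amazon web services|gcp,google cloud platform,google cloud|azure,microsoft azure"

-- the dict comprehension over enumerate(_GROUPS_SPEC.split('|')) and group.split(',')
def pvGroupIndex : PySem.Dict String Int :=
  ((PySem.List.enumerate ((PySem.Str.split? pvGroupsSpec "|").getD [])).flatMap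
     (fun p => ((PySem.Str.split? p.2 ",").getD []).map (fun s => (s, p.1)))).foldl
    (fun d q => d.insert q.1 q.2) PySem.Dict.empty

def are_skill_variations_py_alt (skill1 : String) (skill2 : String) : Bool :=
  match PySem.Dict.get? pvGroupIndex skill1 with
  | none => false
  | some g1 => some g1 == PySem.Dict.get? pvGroupIndex skill2

-- ===== PRECONDITION & SPEC =====
def Spec_are_skill_variations_py (skill1 : String) (skill2 : String) (out : Bool) : Prop := out = are_skill_variations_py_alt skill1 skill2
instance (skill1 : String) (skill2 : String) (out : Bool) : Decidable (Spec_are_skill_variations_py skill1 skill2 out) := by unfold Spec_are_skill_variations_py; infer_instance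

-- ===== CLAIM (what is proved, stated in full; the proofs are below) =====
def Claim_equal_are_skill_variations_py : Prop := ∀ (skill1 : String) (skill2 : String), Dom_are_skill_variations_py skill1 skill2 → Spec_are_skill_variations_py skill1 skill2 (are_skill_variations_py skill1 skill2)

-- ===== LEMMAS AND PROOFS =====

-- first group (counting from i) whose member list contains s
def pvLk (s : String) (i : Int) : List (List String) → Option Int
  | [] => none
  | g :: rest => if g.contains s then some i else pvLk s (i + 1) rest

-- proof-side mirror of the 16 groups as plain lists
def pvSkillGroups : List (List String) :=
  [["javascript", "js", "ecmascript"],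
   ["typescript", "ts"],
   ["python", "py"],
   ["c++", "cpp", "cplusplus"],
   ["c#", "csharp", "c sharp"],
   ["nodejs", "node", "node.js"],
   ["react", "reactjs", "react.js"],
   ["angular", "angularjs", "angular.js"],
   ["vue", "vuejs", "vue.js"],
   ["mongodb", "mongo"],
   ["postgresql", "postgres"],
   ["docker", "containers", "containerization"],
   ["kubernetes", "k8s"],
   ["aws", "amazon web services"],
   ["gcp", "google cloud platform", "google cloud"],
   ["azure", "microsoft azure"]]

theorem pvLk_ge (s : String) (gs : List (List String)) : ∀ (i j : Int), pvLk s i gs = some j → i ≤ j := by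
  induction gs with
  | nil => intro i j h; simp [pvLk] at h
  | cons g rest ih =>
      intro i j h
      rw [pvLk] at h
      split at h
      · simp only [Option.some.injEq] at h; omega
      · have := ih (i + 1) j h; omega

theorem pvLoopA_notmem1 (s1 s2 : String) : ∀ (gs : List (List String)), s1 ∉ gs.flatten → pvLoopA s1 s2 gs = false := by
  intro gs
  induction gs with
  | nil => intro _; rfl
  | cons g rest ih =>
      intro h
      simp only [List.flatten_cons, List.mem_append] at h
      have h1 : PySem.Set.contains g s1 = false := by
        simp only [PySem.Set.contains, List.contains_eq_mem, decide_eq_false_iff_not]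
        exact fun hm => h (Or.inl hm)
      rw [pvLoopA, h1]
      simp only [Bool.false_and, Bool.false_eq_true, if_false]
      exact ih (fun hm => h (Or.inr hm))

theorem pvLoopA_notmem2 (s1 s2 : String) : ∀ (gs : List (List String)), s2 ∉ gs.flatten → pvLoopA s1 s2 gs = false := by
  intro gs
  induction gs with
  | nil => intro _; rfl
  | cons g rest ih =>
      intro h
      simp only [List.flatten_cons, List.mem_append] at h
      have h2 : PySem.Set.contains g s2 = false := by
        simp only [PySem.Set.contains, List.contains_eq_mem, decide_eq_false_iff_not]
        exact fun hm => h (Or.inl hm)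
      rw [pvLoopA, h2]
      simp only [Bool.and_false, Bool.false_eq_true, if_false]
      exact ih (fun hm => h (Or.inr hm))

-- the loop over groups equals "both indexed to the same group" when variant strings are globally distinct
theorem pvL2 (s1 s2 : String) : ∀ (gs : List (List String)) (i : Int), gs.flatten.Nodup →
    pvLoopA s1 s2 gs = (match pvLk s1 i gs with
                        | none => false
                        | some g1 => some g1 == pvLk s2 i gs) := by
  intro gs
  induction gs with
  | nil => intro i _; rfl
  | cons g rest ih =>
      intro i hnd
      simp only [List.flatten_cons, List.nodup_append] at hnd
      obtain ⟨-, hrest, hdisj⟩ := hnd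
      simp only [pvLoopA, pvLk, PySem.Set.contains]
      by_cases h1 : g.contains s1 <;> by_cases h2 : g.contains s2 <;>
        simp only [h1, h2, Bool.and_self, Bool.and_false,
          Bool.and_true, if_true, Bool.false_eq_true, if_false]
      · simp
      · -- s1 in g, s2 not: the loop skips g and s1 occurs in no later group
        have hm1 : s1 ∈ g := by simpa [List.contains_eq_mem] using h1
        rw [pvLoopA_notmem1 s1 s2 rest (fun hm => hdisj _ hm1 _ hm rfl)]
        cases hc : pvLk s2 (i + 1) rest with
        | none => rfl
        | some j =>
            have := pvLk_ge s2 rest (i + 1) j hc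
            have hne : i ≠ j := by omega
            simp [hne]
      · have hm2 : s2 ∈ g := by simpa [List.contains_eq_mem] using h2
        rw [pvLoopA_notmem2 s1 s2 rest (fun hm => hdisj _ hm2 _ hm rfl)]
        cases hc : pvLk s1 (i + 1) rest with
        | none => rfl
        | some j =>
            have := pvLk_ge s1 rest (i + 1) j hc
            have hne : j ≠ i := by omega
            simp [hne]
      · exact ih (i + 1) hrest

theorem pvGroupIndex_eq : pvGroupIndex = ⟨[("javascript", (0 : Int)), ("js", (0 : Int)), ("ecmascript", (0 : Int)), ("typescript", (1 : Int)), ("ts", (1 : Int)), ("python", (2 : Int)), ("py", (2 : Int)), ("c++", (3 : Int)), ("cpp", (3 : Int)), ("cplusplus", (3 : Int)), ("c#", (4 : Int)), ("csharp", (4 : Int)), ("c sharp", (4 : Int)), ("nodejs", (5 : Int)), ("node", (5 : Int)), ("node.js", (5 : Int)), ("react", (6 : Int)), ("reactjs", (6 : Int)), ("react.js", (6 : Int)), ("angular", (7 : Int)), ("angularjs", (7 : Int)), ("angular.js", (7 : Int)), ("vue", (8 : Int)), ("vuejs", (8 : Int)), ("vue.js", (8 : Int)), ("mongodb", (9 :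 Int)), ("mongo", (9 : Int)), ("postgresql", (10 : Int)), ("postgres", (10 : Int)), ("docker", (11 : Int)), ("containers", (11 : Int)), ("containerization", (11 : Int)), ("kubernetes", (12 : Int)), ("k8s", (12 : Int)), ("aws", (13 : Int)), ("amazon web services", (13 : Int)), ("gcp", (14 : Int)), ("google cloud platform", (14 : Int)), ("google cloud", (14 : Int)), ("azure", (15 : Int)), ("microsoft azure", (15 : Int))]⟩ := by decide

-- the built dict looks up exactly the first (and only) group containing s
theorem pvL1 (s : String) : PySem.Dict.get? pvGroupIndex s = pvLk s 0 pvSkillGroups := by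
  rw [pvGroupIndex_eq]
  by_cases h1 : s = "javascript"
  · subst h1; decide
  have e1 : ("javascript" == s) = false := beq_eq_false_iff_ne.mpr (fun e => h1 e.symm)
  have f1 : (s == "javascript") = false := beq_eq_false_iff_ne.mpr h1
  by_cases h2 : s = "js"
  · subst h2; decide
  have e2 : ("js" == s) = false := beq_eq_false_iff_ne.mpr (fun e => h2 e.symm)
  have f2 : (s == "js") = false := beq_eq_false_iff_ne.mpr h2
  by_cases h3 : s = "ecmascript"
  · subst h3; decide
  have e3 : ("ecmascript" == s) = false := beq_eq_false_iff_ne.mpr (fun e => h3 e.symm)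
  have f3 : (s == "ecmascript") = false := beq_eq_false_iff_ne.mpr h3
  by_cases h4 : s = "typescript"
  · subst h4; decide
  have e4 : ("typescript" == s) = false := beq_eq_false_iff_ne.mpr (fun e => h4 e.symm)
  have f4 : (s == "typescript") = false := beq_eq_false_iff_ne.mpr h4
  by_cases h5 : s = "ts"
  · subst h5; decide
  have e5 : ("ts" == s) = false := beq_eq_false_iff_ne.mpr (fun e => h5 e.symm)
  have f5 : (s == "ts") = false := beq_eq_false_iff_ne.mpr h5
  by_cases h6 : s = "python"
  · subst h6; decide
  have e6 : ("python" == s) = false := beq_eq_false_iff_ne.mpr (fun e => h6 e.symm)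
  have f6 : (s == "python") = false := beq_eq_false_iff_ne.mpr h6
  by_cases h7 : s = "py"
  · subst h7; decide
  have e7 : ("py" == s) = false := beq_eq_false_iff_ne.mpr (fun e => h7 e.symm)
  have f7 : (s == "py") = false := beq_eq_false_iff_ne.mpr h7
  by_cases h8 : s = "c++"
  · subst h8; decide
  have e8 : ("c++" == s) = false := beq_eq_false_iff_ne.mpr (fun e => h8 e.symm)
  have f8 : (s == "c++") = false := beq_eq_false_iff_ne.mpr h8
  by_cases h9 : s = "cpp"
  · subst h9; decide
  have e9 : ("cpp" == s) = false := beq_eq_false_iff_ne.mpr (fun e => h9 e.symm)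
  have f9 : (s == "cpp") = false := beq_eq_false_iff_ne.mpr h9
  by_cases h10 : s = "cplusplus"
  · subst h10; decide
  have e10 : ("cplusplus" == s) = false := beq_eq_false_iff_ne.mpr (fun e => h10 e.symm)
  have f10 : (s == "cplusplus") = false := beq_eq_false_iff_ne.mpr h10
  by_cases h11 : s = "c#"
  · subst h11; decide
  have e11 : ("c#" == s) = false := beq_eq_false_iff_ne.mpr (fun e => h11 e.symm)
  have f11 : (s == "c#") = false := beq_eq_false_iff_ne.mpr h11
  by_cases h12 : s = "csharp"
  · subst h12; decide
  have e12 : ("csharp" == s) = false := beq_eq_false_iff_ne.mpr (fun e => h12 e.symm)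
  have f12 : (s == "csharp") = false := beq_eq_false_iff_ne.mpr h12
  by_cases h13 : s = "c sharp"
  · subst h13; decide
  have e13 : ("c sharp" == s) = false := beq_eq_false_iff_ne.mpr (fun e => h13 e.symm)
  have f13 : (s == "c sharp") = false := beq_eq_false_iff_ne.mpr h13
  by_cases h14 : s = "nodejs"
  · subst h14; decide
  have e14 : ("nodejs" == s) = false := beq_eq_false_iff_ne.mpr (fun e => h14 e.symm)
  have f14 : (s == "nodejs") = false := beq_eq_false_iff_ne.mpr h14
  by_cases h15 : s = "node"
  · subst h15; decide
  have e15 : ("node" == s) = false := beq_eq_false_iff_ne.mpr (fun e => h15 e.symm)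
  have f15 : (s == "node") = false := beq_eq_false_iff_ne.mpr h15
  by_cases h16 : s = "node.js"
  · subst h16; decide
  have e16 : ("node.js" == s) = false := beq_eq_false_iff_ne.mpr (fun e => h16 e.symm)
  have f16 : (s == "node.js") = false := beq_eq_false_iff_ne.mpr h16
  by_cases h17 : s = "react"
  · subst h17; decide
  have e17 : ("react" == s) = false := beq_eq_false_iff_ne.mpr (fun e => h17 e.symm)
  have f17 : (s == "react") = false := beq_eq_false_iff_ne.mpr h17
  by_cases h18 : s = "reactjs"
  · subst h18; decide
  have e18 : ("reactjs" == s) = false := beq_eq_false_iff_ne.mpr (fun e => h18 e.symm)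
  have f18 : (s == "reactjs") = false := beq_eq_false_iff_ne.mpr h18
  by_cases h19 : s = "react.js"
  · subst h19; decide
  have e19 : ("react.js" == s) = false := beq_eq_false_iff_ne.mpr (fun e => h19 e.symm)
  have f19 : (s == "react.js") = false := beq_eq_false_iff_ne.mpr h19
  by_cases h20 : s = "angular"
  · subst h20; decide
  have e20 : ("angular" == s) = false := beq_eq_false_iff_ne.mpr (fun e => h20 e.symm)
  have f20 : (s == "angular") = false := beq_eq_false_iff_ne.mpr h20
  by_cases h21 : s = "angularjs"
  · subst h21; decide
  have e21 : ("angularjs" == s) = false := beq_eq_false_iff_ne.mpr (fun e => h21 e.symm)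
  have f21 : (s == "angularjs") = false := beq_eq_false_iff_ne.mpr h21
  by_cases h22 : s = "angular.js"
  · subst h22; decide
  have e22 : ("angular.js" == s) = false := beq_eq_false_iff_ne.mpr (fun e => h22 e.symm)
  have f22 : (s == "angular.js") = false := beq_eq_false_iff_ne.mpr h22
  by_cases h23 : s = "vue"
  · subst h23; decide
  have e23 : ("vue" == s) = false := beq_eq_false_iff_ne.mpr (fun e => h23 e.symm)
  have f23 : (s == "vue") = false := beq_eq_false_iff_ne.mpr h23
  by_cases h24 : s = "vuejs"
  · subst h24; decide
  have e24 : ("vuejs" == s) = false := beq_eq_false_iff_ne.mpr (fun e => h24 e.symm)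
  have f24 : (s == "vuejs") = false := beq_eq_false_iff_ne.mpr h24
  by_cases h25 : s = "vue.js"
  · subst h25; decide
  have e25 : ("vue.js" == s) = false := beq_eq_false_iff_ne.mpr (fun e => h25 e.symm)
  have f25 : (s == "vue.js") = false := beq_eq_false_iff_ne.mpr h25
  by_cases h26 : s = "mongodb"
  · subst h26; decide
  have e26 : ("mongodb" == s) = false := beq_eq_false_iff_ne.mpr (fun e => h26 e.symm)
  have f26 : (s == "mongodb") = false := beq_eq_false_iff_ne.mpr h26
  by_cases h27 : s = "mongo"
  · subst h27; decide
  have e27 : ("mongo" == s) = false := beq_eq_false_iff_ne.mpr (fun e => h27 e.symm)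
  have f27 : (s == "mongo") = false := beq_eq_false_iff_ne.mpr h27
  by_cases h28 : s = "postgresql"
  · subst h28; decide
  have e28 : ("postgresql" == s) = false := beq_eq_false_iff_ne.mpr (fun e => h28 e.symm)
  have f28 : (s == "postgresql") = false := beq_eq_false_iff_ne.mpr h28
  by_cases h29 : s = "postgres"
  · subst h29; decide
  have e29 : ("postgres" == s) = false := beq_eq_false_iff_ne.mpr (fun e => h29 e.symm)
  have f29 : (s == "postgres") = false := beq_eq_false_iff_ne.mpr h29
  by_cases h30 : s = "docker"
  · subst h30; decide
  have e30 : ("docker" == s) = false := beq_eq_false_iff_ne.mpr (fun e => h30 e.symm)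
  have f30 : (s == "docker") = false := beq_eq_false_iff_ne.mpr h30
  by_cases h31 : s = "containers"
  · subst h31; decide
  have e31 : ("containers" == s) = false := beq_eq_false_iff_ne.mpr (fun e => h31 e.symm)
  have f31 : (s == "containers") = false := beq_eq_false_iff_ne.mpr h31
  by_cases h32 : s = "containerization"
  · subst h32; decide
  have e32 : ("containerization" == s) = false := beq_eq_false_iff_ne.mpr (fun e => h32 e.symm)
  have f32 : (s == "containerization") = false := beq_eq_false_iff_ne.mpr h32
  by_cases h33 : s = "kubernetes"
  · subst h33; decide
  have e33 : ("kubernetes" == s) = false := beq_eq_false_iff_ne.mpr (fun e => h33 e.symm)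
  have f33 : (s == "kubernetes") = false := beq_eq_false_iff_ne.mpr h33
  by_cases h34 : s = "k8s"
  · subst h34; decide
  have e34 : ("k8s" == s) = false := beq_eq_false_iff_ne.mpr (fun e => h34 e.symm)
  have f34 : (s == "k8s") = false := beq_eq_false_iff_ne.mpr h34
  by_cases h35 : s = "aws"
  · subst h35; decide
  have e35 : ("aws" == s) = false := beq_eq_false_iff_ne.mpr (fun e => h35 e.symm)
  have f35 : (s == "aws") = false := beq_eq_false_iff_ne.mpr h35
  by_cases h36 : s = "amazon web services"
  · subst h36; decide
  have e36 : ("amazon web services" == s) = false := beq_eq_false_iff_ne.mpr (fun e => h36 e.symm)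
  have f36 : (s == "amazon web services") = false := beq_eq_false_iff_ne.mpr h36
  by_cases h37 : s = "gcp"
  · subst h37; decide
  have e37 : ("gcp" == s) = false := beq_eq_false_iff_ne.mpr (fun e => h37 e.symm)
  have f37 : (s == "gcp") = false := beq_eq_false_iff_ne.mpr h37
  by_cases h38 : s = "google cloud platform"
  · subst h38; decide
  have e38 : ("google cloud platform" == s) = false := beq_eq_false_iff_ne.mpr (fun e => h38 e.symm)
  have f38 : (s == "google cloud platform") = false := beq_eq_false_iff_ne.mpr h38
  by_cases h39 : s = "google cloud"
  · subst h39; decide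
  have e39 : ("google cloud" == s) = false := beq_eq_false_iff_ne.mpr (fun e => h39 e.symm)
  have f39 : (s == "google cloud") = false := beq_eq_false_iff_ne.mpr h39
  by_cases h40 : s = "azure"
  · subst h40; decide
  have e40 : ("azure" == s) = false := beq_eq_false_iff_ne.mpr (fun e => h40 e.symm)
  have f40 : (s == "azure") = false := beq_eq_false_iff_ne.mpr h40
  by_cases h41 : s = "microsoft azure"
  · subst h41; decide
  have e41 : ("microsoft azure" == s) = false := beq_eq_false_iff_ne.mpr (fun e => h41 e.symm)
  have f41 : (s == "microsoft azure") = false := beq_eq_false_iff_ne.mpr h41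
  simp [PySem.Dict.get?, List.find?, pvLk, pvSkillGroups, List.contains, List.elem,
    e1, f1, e2, f2, e3, f3, e4, f4, e5, f5, e6, f6, e7, f7, e8, f8, e9, f9, e10, f10, e11, f11, e12, f12, e13, f13, e14, f14, e15, f15, e16, f16, e17, f17, e18, f18, e19, f19, e20, f20, e21, f21, e22, f22, e23, f23, e24, f24, e25, f25, e26, f26, e27, f27, e28, f28, e29, f29, e30, f30, e31, f31, e32, f32, e33, f33, e34, f34, e35, f35, e36, f36, e37, f37, e38, f38, e39, f39, e40, f40, e41, f41]

theorem pvGroupsEq : pvVariations = pvSkillGroups := by decide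

-- ===== VERDICT (by name: the statement is the Claim_ definition above) =====
theorem are_skill_variations_py_spec : Claim_equal_are_skill_variations_py := by
  intro s1 s2 _
  unfold Spec_are_skill_variations_py are_skill_variations_py are_skill_variations_py_alt
  rw [pvGroupsEq, pvL2 s1 s2 pvSkillGroups 0 (by decide), pvL1 s1, pvL1 s2]
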